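-- pv_equiv track=rewrite | github.com/FanchenBao/leetcode | 2023_12_challenge/2023_12_28.py | getLengthOfOptimalCompression
-- ===== SOURCE A (Python) =====
-- from functools import lru_cache
--
-- def getLengthOfOptimalCompression(s: str, k: int) -> int:
--     """
--     This is another attempt at this problem WITHOUT the mind twister.
--
--     At each position idx, we simply assume that it is the correct
--     letter. Thus we go from idx to the end and for each count of
--     letter s[idx], we try to see if that is the correct letter with
--     the correct count. This avoids the complexity of thinking about
--     grabbing the max count from idx to the end.
--
--     Also, at each position, we have to consider removing it.
--
--     O(N^2), 986 ms, faster than 96.46%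
--     """
--     MAX = 1000
--
--     def encoded_length(l: int) -> int:
--         if l == 1:
--             return 1
--         elif l < 10:
--             return 2
--         elif l < 100:
--             return 3
--         else:
--             return 4
--
--     @lru_cache(maxsize=None)
--     def dp(idx: int, rem: int) -> int:
--         if rem < 0:
--             return MAX
--         if len(s) - idx <= rem:  # not enough letters to be removed
--             return 0
--         count = 0
--         res = dp(idx + 1, rem - 1)  # remove the current letter
--         # Or not remove the current. When removing the current letter
--         # we need to group together all the same letters.
--         for i in range(idx, len(s)):
--             count += s[i] == s[idx]
--             to_remove = i - idx + 1 - count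
--             res = min(res, encoded_length(count) + dp(i + 1, rem - to_remove))
--         return res
--
--     return dp(0, k)
-- ===== SOURCE B (Python) =====
-- def getLengthOfOptimalCompression(s: str, k: int) -> int:
--     """Bottom-up tabulation: dp[idx][rem] filled from idx = n down to 0."""
--     MAX = 1000
--
--     def encoded_length(l: int) -> int:
--         if l == 1:
--             return 1
--         elif l < 10:
--             return 2
--         elif l < 100:
--             return 3
--         else:
--             return 4
--
--     if k < 0:
--         return MAX
--     n = len(s)
--     if n <= k:
--         return 0
--     # dp[idx][rem]: min encoded length of s[idx:] after removing exactly up to rem chars.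
--     # Cells with n - idx <= rem are 0, which the zero-initialised table already holds.
--     dp = [[0] * (k + 1) for _ in range(n + 1)]
--     for idx in range(n - 1, -1, -1):
--         for rem in range(k + 1):
--             if n - idx <= rem:
--                 continue  # keep 0
--             best = dp[idx + 1][rem - 1] if rem >= 1 else MAX
--             count = 0
--             for i in range(idx, n):
--                 count += s[i] == s[idx]
--                 r2 = rem - (i - idx + 1 - count)
--                 sub = MAX if r2 < 0 else dp[i + 1][r2]
--                 cand = encoded_length(count) + sub
--                 if cand < best:
--                     best = cand
--             dp[idx][rem] = best
--     return dp[0][k]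
-- ===== Notes on version B (the rewrite author's own statement) =====
-- stated objective: alternative
-- what changed: Replaced A's memoized top-down recursion (lru_cache on dp(idx, rem)) by an explicit bottom-up tabulation that fills a (n+1) x (k+1) table row by row from idx = n-1 down to 0, with the rem<0 sentinel and the 'enough removals left' base case handled as top-level guards and zero-initialised table cells.
import Mathlib
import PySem

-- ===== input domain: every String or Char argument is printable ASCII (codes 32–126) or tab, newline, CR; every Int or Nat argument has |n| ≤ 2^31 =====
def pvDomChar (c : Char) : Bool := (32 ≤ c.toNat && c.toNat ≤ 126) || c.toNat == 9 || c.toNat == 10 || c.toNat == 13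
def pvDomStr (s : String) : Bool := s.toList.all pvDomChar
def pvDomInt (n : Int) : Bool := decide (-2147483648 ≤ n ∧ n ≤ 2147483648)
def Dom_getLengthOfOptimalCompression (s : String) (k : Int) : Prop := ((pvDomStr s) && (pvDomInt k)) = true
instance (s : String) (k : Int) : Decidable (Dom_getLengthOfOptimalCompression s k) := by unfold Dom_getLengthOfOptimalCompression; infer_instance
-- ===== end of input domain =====

-- B replaces A's memoized top-down recursion by an explicit bottom-up 2D table
-- (objective: alternative decomposition, same asymptotic cost).

-- ===== PORT A =====
-- encoded_length, ported verbatim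
def pvEnc (l : Int) : Int :=
  if l = 1 then 1 else if l < 10 then 2 else if l < 100 then 3 else 4

-- dp(idx, rem); memoization (lru_cache) does not change the value, so the port is
-- the plain recursion.  idx is the Python recursion index (always 0 ≤ idx);
-- s[i] and s[idx] are both in range whenever read, so the Option-valued lookups
-- cs[i]? / cs[idx]? compare exactly as Python's s[i] == s[idx].
def pvDpA (cs : List Char) (idx : Nat) (rem : Int) : Int :=
  if _h1 : rem < 0 then 1000
  else if _h2 : (cs.length : Int) - idx ≤ rem then 0
  else
    ((List.range' idx (cs.length - idx)).attach.foldl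
      (fun (st : Int × Int) x =>
        let count := st.1 + (if cs[x.1]? = cs[idx]? then 1 else 0)
        let to_remove := (x.1 : Int) - idx + 1 - count
        (count, min st.2 (pvEnc count + pvDpA cs (x.1 + 1) (rem - to_remove))))
      ((0 : Int), pvDpA cs (idx + 1) (rem - 1))).2
termination_by cs.length - idx
decreasing_by
  · have hx := List.mem_range'_1.mp x.2
    omega
  · omega

def getLengthOfOptimalCompression (s : String) (k : Int) : Int :=
  pvDpA s.toList 0 k

-- ===== PORT B =====
-- the inner-loop body of B (one step of the scan over i = idx..n-1)
def pvStepB (cs : List Char) (dp : List (List Int)) (idx : Nat) (rem : Nat)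
    (st : Int × Int) (i : Nat) : Int × Int :=
  let count := st.1 + (if cs[i]? = cs[idx]? then 1 else 0)
  let r2 : Int := (rem : Int) - ((i : Int) - idx + 1 - count)
  let sub : Int := if r2 < 0 then 1000 else (dp.getD (i + 1) []).getD r2.toNat 0
  let cand := pvEnc count + sub
  (count, if cand < st.2 then cand else st.2)

-- one row of the table: dp[idx][rem] for rem = 0..kk, reading rows > idx of dp
def pvRowB (cs : List Char) (dp : List (List Int)) (idx : Nat) (kk : Nat) : List Int :=
  (List.range (kk + 1)).map (fun (rem : Nat) =>
    if (cs.length : Int) - idx ≤ (rem : Int) then 0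
    else
      let best0 : Int := if 1 ≤ rem then (dp.getD (idx + 1) []).getD (rem - 1) 0 else 1000
      ((List.range' idx (cs.length - idx)).foldl (pvStepB cs dp idx rem)
        ((0 : Int), best0)).2)

def getLengthOfOptimalCompression_alt (s : String) (k : Int) : Int :=
  if k < 0 then 1000
  else
    let cs := s.toList
    let n := cs.length
    if (n : Int) ≤ k then 0
    else
      let kk := k.toNat
      let dp0 := List.replicate (n + 1) (List.replicate (kk + 1) (0 : Int))
      let dp := (List.range n).reverse.foldl
        (fun dp idx => dp.set idx (pvRowB cs dp idx kk)) dp0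
      (dp.getD 0 []).getD kk 0

-- ===== PRECONDITION & SPEC =====
def Spec_getLengthOfOptimalCompression (s : String) (k : Int) (out : Int) : Prop := out = getLengthOfOptimalCompression_alt s k
instance (s : String) (k : Int) (out : Int) : Decidable (Spec_getLengthOfOptimalCompression s k out) := by unfold Spec_getLengthOfOptimalCompression; infer_instance

-- ===== CLAIM (what is proved, stated in full; the proofs are below) =====
def Claim_equal_getLengthOfOptimalCompression : Prop := ∀ (s : String) (k : Int), Dom_getLengthOfOptimalCompression s k → Spec_getLengthOfOptimalCompression s k (getLengthOfOptimalCompression s k)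

-- ===== LEMMAS AND PROOFS =====

theorem pvDpA_neg (cs : List Char) (idx : Nat) (rem : Int) (h : rem < 0) :
    pvDpA cs idx rem = 1000 := by
  rw [pvDpA]; simp [h]

theorem pvDpA_base (cs : List Char) (idx : Nat) (rem : Int) (h0 : ¬ rem < 0)
    (h : (cs.length : Int) - idx ≤ rem) : pvDpA cs idx rem = 0 := by
  rw [pvDpA]; simp [h0, h]

-- the inner-loop body of A's recursion, named for the proofs
def pvStepA (cs : List Char) (idx : Nat) (rem : Int) (st : Int × Int) (i : Nat) : Int × Int :=
  let count := st.1 + (if cs[i]? = cs[idx]? then 1 else 0)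
  let to_remove := (i : Int) - idx + 1 - count
  (count, min st.2 (pvEnc count + pvDpA cs (i + 1) (rem - to_remove)))

-- the table invariant: rows t..n of dp hold A's dp values, all rows have width kk+1
def TblInv (cs : List Char) (kk : Nat) (t : Nat) (dp : List (List Int)) : Prop :=
  dp.length = cs.length + 1 ∧
  (∀ j, j ≤ cs.length → (dp.getD j []).length = kk + 1) ∧
  (∀ j r, t ≤ j → j ≤ cs.length → r ≤ kk →
    (dp.getD j []).getD r 0 = pvDpA cs j (r : Int))

-- the two inner folds agree once table reads are A's dp values
theorem inner_fold_eq (cs : List Char) (dp : List (List Int)) (idx : Nat) (kk : Nat)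
    (rem : Nat) (hrem : rem ≤ kk)
    (hread : ∀ j r, idx + 1 ≤ j → j ≤ cs.length → r ≤ kk →
      (dp.getD j []).getD r 0 = pvDpA cs j (r : Int)) :
    ∀ (m j : Nat) (c a : Int), idx ≤ j → j + m ≤ cs.length → c ≤ (j : Int) - idx →
      ((List.range' j m).foldl (pvStepB cs dp idx rem) (c, a)).2
      = ((List.range' j m).foldl (pvStepA cs idx (rem : Int)) (c, a)).2 := by
  intro m
  induction m with
  | zero => intro j c a _ _ _; rfl
  | succ m ih =>
    intro j c a hj hjm hc
    rw [List.range'_succ, List.foldl_cons, List.foldl_cons]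
    set b : Int := (if cs[j]? = cs[idx]? then (1 : Int) else 0) with hbdef
    have hb01 : 0 ≤ b ∧ b ≤ 1 := by rw [hbdef]; split <;> omega
    set count : Int := c + b with hcount
    set r2 : Int := (rem : Int) - ((j : Int) - idx + 1 - count) with hr2
    have hr2le : r2 ≤ (rem : Int) := by omega
    have hsub : (if r2 < 0 then (1000 : Int) else (dp.getD (j + 1) []).getD r2.toNat 0)
        = pvDpA cs (j + 1) r2 := by
      by_cases hneg : r2 < 0
      · simp [hneg, pvDpA_neg _ _ _ hneg]
      · have h0 : (0 : Int) ≤ r2 := by omega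
        have hle : r2.toNat ≤ kk := by omega
        rw [if_neg hneg, hread (j + 1) r2.toNat (by omega) (by omega) hle,
          Int.toNat_of_nonneg h0]
    have hstep : pvStepB cs dp idx rem (c, a) j
        = (count, min a (pvEnc count + pvDpA cs (j + 1) r2)) := by
      unfold pvStepB
      simp only []
      rw [← hbdef, ← hcount, ← hr2, hsub]
      refine Prod.ext rfl ?_
      simp only [min_def]
      split <;> split <;> omega
    have hstepA : pvStepA cs idx (rem : Int) (c, a) j
        = (count, min a (pvEnc count + pvDpA cs (j + 1) r2)) := by
      unfold pvStepA
      simp only []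
      rw [← hbdef, ← hcount, ← hr2]
    rw [hstep, hstepA]
    exact ih (j + 1) count _ (by omega) (by omega) (by omega)

-- one cell of B's freshly computed row equals A's dp value
theorem row_cell (cs : List Char) (kk t : Nat) (dp : List (List Int))
    (hval : ∀ j r, t + 1 ≤ j → j ≤ cs.length → r ≤ kk →
      (dp.getD j []).getD r 0 = pvDpA cs j (r : Int))
    (ht : t < cs.length) (r : Nat) (hr : r ≤ kk) :
    (pvRowB cs dp t kk).getD r 0 = pvDpA cs t (r : Int) := by
  have hcell : (pvRowB cs dp t kk).getD r 0 =
      (if (cs.length : Int) - t ≤ (r : Int) then 0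
       else
        let best0 : Int := if 1 ≤ r then (dp.getD (t + 1) []).getD (r - 1) 0 else 1000
        ((List.range' t (cs.length - t)).foldl (pvStepB cs dp t r)
          ((0 : Int), best0)).2) := by
    have hlt : r < kk + 1 := by omega
    simp [pvRowB, List.getD_eq_getElem?_getD, hlt]
  rw [hcell]
  by_cases hbase : (cs.length : Int) - t ≤ (r : Int)
  · rw [if_pos hbase, pvDpA_base cs t r (by omega) (by omega)]
  · rw [if_neg hbase]
    have hbest0 : (if 1 ≤ r then (dp.getD (t + 1) []).getD (r - 1) 0 else (1000 : Int))
        = pvDpA cs (t + 1) ((r : Int) - 1) := by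
      by_cases h1 : 1 ≤ r
      · rw [if_pos h1, hval (t + 1) (r - 1) (by omega) (by omega) (by omega)]
        congr 1
        omega
      · rw [if_neg h1, pvDpA_neg cs (t + 1) _ (by omega)]
    rw [pvDpA]
    rw [dif_neg (by omega : ¬ ((r : Int) < 0)), dif_neg (by omega)]
    show ((List.range' t (cs.length - t)).foldl (pvStepB cs dp t r)
        ((0 : Int), if 1 ≤ r then (dp.getD (t + 1) []).getD (r - 1) 0 else 1000)).2
      = ((List.range' t (cs.length - t)).attach.foldl
          (fun st x => pvStepA cs t ((r : Int)) st x.1)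
          ((0 : Int), pvDpA cs (t + 1) ((r : Int) - 1))).2
    rw [List.foldl_attach, hbest0]
    exact inner_fold_eq cs dp t kk r hr
      (fun j' r' h1 h2 h3 => hval j' r' (by omega) h2 h3)
      (cs.length - t) t 0 (pvDpA cs (t + 1) ((r : Int) - 1))
      (le_refl t) (by omega) (by omega)

-- setting row t preserves the invariant, now down to t
theorem row_correct (cs : List Char) (kk t : Nat) (dp : List (List Int))
    (h : TblInv cs kk (t + 1) dp) (ht : t < cs.length) :
    TblInv cs kk t (dp.set t (pvRowB cs dp t kk)) := by
  obtain ⟨hlen, hwid, hval⟩ := h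
  have hrowlen : (pvRowB cs dp t kk).length = kk + 1 := by
    simp [pvRowB]
  have hget : ∀ j, ((dp.set t (pvRowB cs dp t kk)).getD j []) =
      if j = t then pvRowB cs dp t kk else dp.getD j [] := by
    intro j
    by_cases hj : j = t
    · rw [if_pos hj, hj, List.getD_eq_getElem?_getD,
        List.getElem?_set_self (by omega : t < dp.length), Option.getD_some]
    · rw [if_neg hj, List.getD_eq_getElem?_getD,
        List.getElem?_set_ne (fun h' => hj h'.symm), List.getD_eq_getElem?_getD]
  refine ⟨by simp [hlen], ?_, ?_⟩
  · intro j hj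
    rw [hget]
    split
    · exact hrowlen
    · exact hwid j hj
  · intro j r hjt hjn hr
    rw [hget]
    by_cases hj : j = t
    · rw [if_pos hj, hj]
      exact row_cell cs kk t dp hval ht r hr
    · rw [if_neg hj]
      exact hval j r (by omega) hjn hr

-- folding the rows from t-1 down to 0 completes the invariant
theorem tbl_fold (cs : List Char) (kk : Nat) :
    ∀ t, t ≤ cs.length → ∀ dp, TblInv cs kk t dp →
      TblInv cs kk 0 ((List.range t).reverse.foldl
        (fun dp idx => dp.set idx (pvRowB cs dp idx kk)) dp) := by
  intro t
  induction t with
  | zero => intro _ dp h; simpa using h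
  | succ t ih =>
    intro ht dp h
    rw [List.range_succ, List.reverse_append, List.reverse_singleton, List.singleton_append,
      List.foldl_cons]
    exact ih (by omega) _ (row_correct cs kk t dp h (by omega))

theorem tbl_init (cs : List Char) (kk : Nat) :
    TblInv cs kk cs.length (List.replicate (cs.length + 1) (List.replicate (kk + 1) (0 : Int))) := by
  refine ⟨by simp, ?_, ?_⟩
  · intro j hj
    simp [List.getD_eq_getElem?_getD, Nat.lt_succ_of_le hj]
  · intro j r hj hj2 hr
    have hje : j = cs.length := le_antisymm hj2 hj
    subst hje
    rw [pvDpA_base cs cs.length (r : Int) (by omega) (by omega)]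
    simp [List.getD_eq_getElem?_getD, Nat.lt_succ_of_le hj2,
      Nat.lt_succ_of_le hr]

-- ===== VERDICT (by name: the statement is the Claim_ definition above) =====
theorem getLengthOfOptimalCompression_spec : Claim_equal_getLengthOfOptimalCompression := by
  intro s k _
  unfold Spec_getLengthOfOptimalCompression getLengthOfOptimalCompression
    getLengthOfOptimalCompression_alt
  by_cases hk : k < 0
  · rw [if_pos hk, pvDpA_neg _ _ _ hk]
  · rw [if_neg hk]
    by_cases hn : (s.toList.length : Int) ≤ k
    · simp only [if_pos hn]
      exact pvDpA_base _ _ _ hk (by omega)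
    · simp only [if_neg hn]
      have hfin := tbl_fold s.toList k.toNat s.toList.length (le_refl _) _
        (tbl_init s.toList k.toNat)
      have := hfin.2.2 0 k.toNat (by omega) (by omega) (le_refl _)
      rw [this, Int.toNat_of_nonneg (by omega)]
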